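-- pv_equiv track=rewrite | github.com/DGG3D/rapidcompact-scripting | rpdc.py | makeProgessBarStr
-- ===== SOURCE A (Python) =====
-- def makeProgessBarStr(progress):
--     barStr    = "["
--     percSteps = 20
--     for i in range(1,percSteps+1):
--         if  progress >= i * 5:
--             barStr += "#"
--         else:
--             barStr += "_"
--     barStr += "]"
--     return barStr
-- ===== SOURCE B (Python) =====
-- def makeProgessBarStr(progress):
--     n = min(20, max(0, progress // 5))
--     return "[" + "#" * n + "_" * (20 - n) + "]"
-- ===== Notes on version B (the rewrite author's own statement) =====
-- stated objective: simpler
-- what changed: Replaces the 20-iteration per-cell loop with a closed-form count n = min(20, max(0, progress // 5)) and string multiplication.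
import Mathlib
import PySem

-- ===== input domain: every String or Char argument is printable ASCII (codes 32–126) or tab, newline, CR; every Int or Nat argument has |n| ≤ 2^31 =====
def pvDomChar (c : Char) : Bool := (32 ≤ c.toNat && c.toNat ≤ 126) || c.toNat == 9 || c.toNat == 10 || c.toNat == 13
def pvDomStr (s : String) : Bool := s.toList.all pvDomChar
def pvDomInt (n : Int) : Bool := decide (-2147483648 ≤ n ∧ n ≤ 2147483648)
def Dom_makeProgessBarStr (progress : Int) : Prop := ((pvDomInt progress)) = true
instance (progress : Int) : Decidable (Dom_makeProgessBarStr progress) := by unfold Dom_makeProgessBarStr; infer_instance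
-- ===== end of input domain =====

-- B replaces A's 20-iteration per-cell loop by a closed-form filled-cell count; same value everywhere (simpler, not faster).

-- ===== PORT A =====
-- strings are ported as List Char (PySem convention), converted to String on return
def makeProgessBarStr (progress : Int) : String :=
  let barStr : List Char := ['[']
  let percSteps : Int := 20
  let barStr :=
    (PySem.List.pyRange 1 (percSteps + 1) 1).foldl
      (fun acc i => if progress ≥ i * 5 then acc ++ ['#'] else acc ++ ['_']) barStr
  let barStr := barStr ++ [']']
  String.ofList barStr

-- ===== PORT B =====
def makeProgessBarStr_alt (progress : Int) : String :=
  let n : Int := min 20 (max 0 (PySem.Int.floordiv progress 5))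
  String.ofList (['['] ++ List.replicate n.toNat '#' ++ List.replicate (20 - n).toNat '_' ++ [']'])

-- ===== PRECONDITION & SPEC =====
def Spec_makeProgessBarStr (progress : Int) (out : String) : Prop := out = makeProgessBarStr_alt progress
instance (progress : Int) (out : String) : Decidable (Spec_makeProgessBarStr progress out) := by unfold Spec_makeProgessBarStr; infer_instance

-- ===== CLAIM (what is proved, stated in full; the proofs are below) =====
def Claim_equal_makeProgessBarStr : Prop := ∀ (progress : Int), Dom_makeProgessBarStr progress → Spec_makeProgessBarStr progress (makeProgessBarStr progress)

-- ===== LEMMAS AND PROOFS =====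

-- A's loop over the first j cells yields min j m hashes then j - min j m underscores,
-- where m is the clamped-below filled-cell count.
lemma barLoop (progress : Int) (j : Nat) :
    (PySem.List.pyRange 1 (1 + (j : Int)) 1).foldl
      (fun acc i => if progress ≥ i * 5 then acc ++ ['#'] else acc ++ ['_']) ['[']
    = ['['] ++ List.replicate (min j (max 0 (PySem.Int.floordiv progress 5)).toNat) '#'
            ++ List.replicate (j - min j (max 0 (PySem.Int.floordiv progress 5)).toNat) '_' := by
  set m := (max 0 (PySem.Int.floordiv progress 5)).toNat with hm
  induction j with
  | zero => simp [PySem.List.pyRange_one_eq_nil]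
  | succ j ih =>
      have hsplit : (1 : Int) + ((j : Int) + 1) = (1 + (j : Int)) + 1 := by ring
      rw [show ((j + 1 : Nat) : Int) = (j : Int) + 1 by push_cast; ring, hsplit,
        PySem.List.pyRange_one_succ_right (by omega), List.foldl_append, ih]
      simp only [List.foldl]
      have hcond : (progress ≥ (1 + (j : Int)) * 5) ↔ j < m := by
        have h5 : ((j : Int) + 1) ≤ PySem.Int.floordiv progress 5 ↔ ((j : Int) + 1) * 5 ≤ progress :=
          PySem.Int.le_floordiv_iff_mul_le (a := progress) (b := 5) (q := (j : Int) + 1) (by norm_num)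
      -- j < m ↔ (j+1 : Int) ≤ floordiv progress 5  (since j+1 > 0, max/toNat drop out)
        constructor
        · intro h
          have : ((j : Int) + 1) ≤ PySem.Int.floordiv progress 5 := h5.mpr (by linarith)
          omega
        · intro h
          have : ((j : Int) + 1) ≤ PySem.Int.floordiv progress 5 := by omega
          have := h5.mp this
          linarith
      by_cases h : j < m
      · rw [if_pos (hcond.mpr h)]
        have h1 : min (j + 1) m = min j m + 1 := by omega
        have h2 : j - min j m = 0 := by omega
        simp [h1, h2, List.replicate_succ']
      · rw [if_neg (fun hc => h (hcond.mp hc))]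
        have h1 : min (j + 1) m = min j m := by omega
        have h2 : j + 1 - min j m = (j - min j m) + 1 := by omega
        simp [h1, h2, List.replicate_succ']

-- ===== VERDICT (by name: the statement is the Claim_ definition above) =====
theorem makeProgessBarStr_spec : Claim_equal_makeProgessBarStr := by
  intro progress _
  unfold Spec_makeProgessBarStr
  simp only [makeProgessBarStr, makeProgessBarStr_alt]
  rw [show (20 : Int) + 1 = 1 + ((20 : Nat) : Int) by norm_num, barLoop progress 20]
  congr 1
  have hn1 : (min 20 (max 0 (PySem.Int.floordiv progress 5))).toNat
      = min 20 (max 0 (PySem.Int.floordiv progress 5)).toNat := by omega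
  have hn2 : (20 - min 20 (max 0 (PySem.Int.floordiv progress 5))).toNat
      = 20 - min 20 (max 0 (PySem.Int.floordiv progress 5)).toNat := by omega
  rw [hn1, hn2]
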